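-- pv_equiv track=rewrite | github.com/catkin/xylem | xylem/install.py | _squash_resolutions
-- ===== SOURCE A (Python) =====
-- def _squash_resolutions(resolved):
--     squashed = []
--     previous_installer_name = None
--     for installer_name, resolutions in resolved:
--         if previous_installer_name != installer_name:
--             squashed.append((installer_name, []))
--             previous_installer_name = installer_name
--         squashed[-1][1].extend(resolutions)
--     return squashed
-- ===== SOURCE B (Python) =====
-- def _squash_resolutions(resolved):
--     def go(lo, hi):
--         # squash resolved[lo:hi] by divide and conquer
--         if hi - lo <= 1:
--             return [(k, list(v)) for (k, v) in resolved[lo:hi]]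
--         mid = (lo + hi) // 2
--         left = go(lo, mid)
--         right = go(mid, hi)
--         if left[-1][0] == right[0][0]:
--             return left[:-1] + [(left[-1][0], left[-1][1] + right[0][1])] + right[1:]
--         return left + right
--     return go(0, len(resolved))
-- ===== Notes on version B (the rewrite author's own statement) =====
-- stated objective: alternative
-- what changed: Replaces A's single left-to-right pass with a previous-installer sentinel and mutate-last-bucket step by a divide-and-conquer recursion: squash each half independently and join at the boundary, merging the two boundary buckets when their installer names coincide (correct because run-squashing is associative under this boundary merge).
import Mathlib
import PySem

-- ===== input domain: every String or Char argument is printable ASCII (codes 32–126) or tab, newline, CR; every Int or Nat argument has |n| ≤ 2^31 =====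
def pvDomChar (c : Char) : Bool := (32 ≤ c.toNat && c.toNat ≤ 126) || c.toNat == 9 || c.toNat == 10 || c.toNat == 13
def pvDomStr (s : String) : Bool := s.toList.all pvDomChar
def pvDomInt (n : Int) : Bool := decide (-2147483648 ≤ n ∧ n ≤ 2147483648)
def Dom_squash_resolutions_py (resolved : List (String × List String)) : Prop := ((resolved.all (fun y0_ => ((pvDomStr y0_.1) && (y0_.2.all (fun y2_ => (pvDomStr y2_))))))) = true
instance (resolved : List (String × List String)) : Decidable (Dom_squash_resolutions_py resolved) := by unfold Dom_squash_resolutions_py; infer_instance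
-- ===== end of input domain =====

-- B replaces A's sentinel-driven single pass by a divide-and-conquer recursion
-- (squash each half, merge the boundary buckets when installer names match): alternative algorithm.

-- ===== PORT A =====
-- helper for Python's `squashed[-1][1].extend(resolutions)`: extend the second
-- component of the LAST element in place (no-op on []; A never reaches it empty).
def pvExtendLast (sq : List (String × List String)) (v : List String) : List (String × List String) :=
  match sq with
  | [] => []
  | [p] => [(p.1, p.2 ++ v)]
  | p :: q :: t => p :: pvExtendLast (q :: t) v

def squash_resolutions_py (resolved : List (String × List String)) : List (String × List String) :=
  (resolved.foldl
    (fun (st : List (String × List String) × Option String) p =>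
      let st' := if st.2 ≠ some p.1 then (st.1 ++ [(p.1, ([] : List String))], some p.1) else st
      (pvExtendLast st'.1 p.2, st'.2))
    ([], none)).1

-- ===== PORT B =====
-- the boundary join: if the last bucket of `left` and the first bucket of `right`
-- carry the same installer name, fuse them (Python's left[:-1] + [..] + right[1:]).
def pvMergeJoin (left right : List (String × List String)) : List (String × List String) :=
  match left.getLast?, right with
  | some p, q :: rt => if p.1 = q.1 then left.dropLast ++ [(p.1, p.2 ++ q.2)] ++ rt else left ++ right
  | _, _ => left ++ right

-- Python B's go(lo, hi) works on the segment resolved[lo:hi]; here the segment is the list itself,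
-- split at half its length ((lo+hi)//2 - lo = len//2 since 2*lo is even).
def squash_resolutions_py_alt (resolved : List (String × List String)) : List (String × List String) :=
  if _h : resolved.length ≤ 1 then resolved.map (fun p => (p.1, p.2))
  else
    pvMergeJoin (squash_resolutions_py_alt (resolved.take (resolved.length / 2)))
                (squash_resolutions_py_alt (resolved.drop (resolved.length / 2)))
termination_by resolved.length
decreasing_by
  · simp only [List.length_take]; omega
  · simp only [List.length_drop]; omega

-- ===== PRECONDITION & SPEC =====
def Spec_squash_resolutions_py (resolved : List (String × List String)) (out : List (String × List String)) : Prop := out = squash_resolutions_py_alt resolved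
instance (resolved : List (String × List String)) (out : List (String × List String)) : Decidable (Spec_squash_resolutions_py resolved out) := by unfold Spec_squash_resolutions_py; infer_instance

-- ===== CLAIM (what is proved, stated in full; the proofs are below) =====
def Claim_equal_squash_resolutions_py : Prop := ∀ (resolved : List (String × List String)), Dom_squash_resolutions_py resolved → Spec_squash_resolutions_py resolved (squash_resolutions_py resolved)

-- ===== LEMMAS AND PROOFS =====

-- canonical run-squashing, the common reference point of both proofs
def pvGroupGo (k : String) (acc : List String) (rest : List (String × List String)) : List (String × List String) :=
  match rest with
  | [] => [(k, acc)]
  | (k', v) :: t => if k' = k then pvGroupGo k (acc ++ v) t else (k, acc) :: pvGroupGo k' v t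

def pvSquashC (l : List (String × List String)) : List (String × List String) :=
  match l with
  | [] => []
  | (k, v) :: t => pvGroupGo k v t

def pvRun (k : String) : List (String × List String) → List String
  | [] => []
  | (k', v) :: t => if k' = k then v ++ pvRun k t else []

def pvRest (k : String) : List (String × List String) → List (String × List String)
  | [] => []
  | (k', v) :: t => if k' = k then pvRest k t else pvGroupGo k' v t

theorem groupGo_eq (t : List (String × List String)) : ∀ (k : String) (acc : List String),
    pvGroupGo k acc t = (k, acc ++ pvRun k t) :: pvRest k t := by
  induction t with
  | nil => intro k acc; simp [pvGroupGo, pvRun, pvRest]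
  | cons p t ih =>
    intro k acc
    obtain ⟨k', v⟩ := p
    by_cases h : k' = k
    · subst h
      simp [pvGroupGo, pvRun, pvRest, ih, List.append_assoc]
    · simp [pvGroupGo, pvRun, pvRest, h]

theorem groupGo_ne_nil (t : List (String × List String)) (k : String) (acc : List String) :
    pvGroupGo k acc t ≠ [] := by
  rw [groupGo_eq]; simp

-- === A = pvSquashC (A's sentinel loop computes the canonical squash) ===
theorem pvExtendLast_append (sq : List (String × List String)) (k : String)
    (acc v : List String) :
    pvExtendLast (sq ++ [(k, acc)]) v = sq ++ [(k, acc ++ v)] := by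
  induction sq with
  | nil => rfl
  | cons h t ih =>
    cases t with
    | nil => simp [pvExtendLast]
    | cons h2 t2 => simpa [pvExtendLast] using ih

theorem squash_loop_invariant (rest : List (String × List String)) :
    ∀ (sq : List (String × List String)) (k : String) (acc : List String),
    (rest.foldl
      (fun (st : List (String × List String) × Option String) p =>
        let st' := if st.2 ≠ some p.1 then (st.1 ++ [(p.1, ([] : List String))], some p.1) else st
        (pvExtendLast st'.1 p.2, st'.2))
      (sq ++ [(k, acc)], some k)).1 = sq ++ pvGroupGo k acc rest := by
  induction rest with
  | nil => intro sq k acc; simp [pvGroupGo]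
  | cons p t ih =>
    intro sq k acc
    obtain ⟨k', v⟩ := p
    by_cases hk : k' = k
    · subst hk
      simpa [pvGroupGo, pvExtendLast_append] using ih sq k' (acc ++ v)
    · have hne : some k ≠ some k' := by simpa using (Ne.symm hk)
      simp only [List.foldl_cons]
      have : (if some k ≠ some k' then (sq ++ [(k, acc)] ++ [(k', ([] : List String))], some k') else (sq ++ [(k, acc)], some k)) = (sq ++ [(k, acc)] ++ [(k', ([] : List String))], some k') := by
        simp [hne]
      rw [this]
      have h2 := ih (sq ++ [(k, acc)]) k' v
      rw [pvExtendLast_append]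
      simpa [pvGroupGo, hk, List.append_assoc] using h2

theorem A_eq_squashC (resolved : List (String × List String)) :
    squash_resolutions_py resolved = pvSquashC resolved := by
  unfold squash_resolutions_py pvSquashC
  cases resolved with
  | nil => rfl
  | cons p t =>
    obtain ⟨k, v⟩ := p
    simp only [List.foldl_cons]
    have h0 : (if (none : Option String) ≠ some k then (([] : List (String × List String)) ++ [(k, ([] : List String))], some k) else ([], none)) = ([(k, ([] : List String))], some k) := by simp
    rw [h0]
    have := squash_loop_invariant t [] k v
    simpa [pvExtendLast] using this

-- === B = pvSquashC (divide and conquer computes the canonical squash) ===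
theorem mergeJoin_nil_left (ys : List (String × List String)) :
    pvMergeJoin [] ys = ys := by
  cases ys <;> simp [pvMergeJoin]

theorem mergeJoin_single_cons (k k2 : String) (acc w : List String)
    (r : List (String × List String)) :
    pvMergeJoin [(k, acc)] ((k2, w) :: r)
      = if k2 = k then (k, acc ++ w) :: r else (k, acc) :: (k2, w) :: r := by
  by_cases h : k2 = k
  · simp [pvMergeJoin, h]
  · simp [pvMergeJoin, h, Ne.symm h]

theorem mergeJoin_single_left (k : String) (acc : List String)
    (b : List (String × List String)) :
    pvMergeJoin [(k, acc)] (pvSquashC b) = pvGroupGo k acc b := by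
  cases b with
  | nil => simp [pvMergeJoin, pvSquashC, pvGroupGo]
  | cons q t =>
    obtain ⟨k', v⟩ := q
    show pvMergeJoin [(k, acc)] (pvGroupGo k' v t) = pvGroupGo k acc ((k', v) :: t)
    rw [groupGo_eq t k' v, mergeJoin_single_cons]
    by_cases h : k' = k
    · subst h
      simp [pvGroupGo, groupGo_eq, List.append_assoc]
    · simp [pvGroupGo, h, groupGo_eq]

theorem mergeJoin_cons (p : String × List String) (xs ys : List (String × List String))
    (hxs : xs ≠ []) : pvMergeJoin (p :: xs) ys = p :: pvMergeJoin xs ys := by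
  obtain ⟨x, xt, rfl⟩ := List.exists_cons_of_ne_nil hxs
  cases ys with
  | nil => simp [pvMergeJoin]
  | cons q rt =>
    simp only [pvMergeJoin, List.getLast?_cons_cons]
    cases hgl : (x :: xt).getLast? with
    | none => simp at hgl
    | some g =>
      by_cases h : g.1 = q.1 <;> simp [h, List.dropLast_cons_of_ne_nil (l := x :: xt) (by simp)]

theorem groupGo_append (t : List (String × List String)) :
    ∀ (k : String) (acc : List String) (b : List (String × List String)),
    pvGroupGo k acc (t ++ b) = pvMergeJoin (pvGroupGo k acc t) (pvSquashC b) := by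
  induction t with
  | nil => intro k acc b; simp [pvGroupGo, mergeJoin_single_left]
  | cons p t ih =>
    intro k acc b
    obtain ⟨k', v⟩ := p
    by_cases h : k' = k
    · subst h
      simp [pvGroupGo, ih]
    · simp only [List.cons_append, pvGroupGo, if_neg h]
      rw [ih, mergeJoin_cons _ _ _ (groupGo_ne_nil t k' v)]

theorem squashC_append (a b : List (String × List String)) :
    pvSquashC (a ++ b) = pvMergeJoin (pvSquashC a) (pvSquashC b) := by
  cases a with
  | nil => simp [pvSquashC, mergeJoin_nil_left]
  | cons p t =>
    obtain ⟨k, v⟩ := p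
    simp [pvSquashC, groupGo_append]

theorem alt_eq_squashC_aux : ∀ (n : Nat) (l : List (String × List String)), l.length ≤ n →
    squash_resolutions_py_alt l = pvSquashC l := by
  intro n
  induction n with
  | zero =>
    intro l hl
    have : l = [] := List.eq_nil_of_length_eq_zero (Nat.le_zero.mp hl)
    subst this
    rw [squash_resolutions_py_alt]
    simp [pvSquashC]
  | succ n ih =>
    intro l hl
    by_cases h1 : l.length ≤ 1
    · rw [squash_resolutions_py_alt, dif_pos h1]
      cases l with
      | nil => simp [pvSquashC]
      | cons p t =>
        cases t with
        | nil => obtain ⟨k, v⟩ := p; simp [pvSquashC, pvGroupGo]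
        | cons q t2 => simp at h1
    · rw [squash_resolutions_py_alt, dif_neg h1]
      have h2 : 2 ≤ l.length := by omega
      have hta : (l.take (l.length / 2)).length ≤ n := by
        simp only [List.length_take]; omega
      have hdr : (l.drop (l.length / 2)).length ≤ n := by
        simp only [List.length_drop]; omega
      rw [ih _ hta, ih _ hdr, ← squashC_append, List.take_append_drop]

theorem alt_eq_squashC (l : List (String × List String)) :
    squash_resolutions_py_alt l = pvSquashC l :=
  alt_eq_squashC_aux l.length l (le_refl _)

-- ===== VERDICT (by name: the statement is the Claim_ definition above) =====
theorem squash_resolutions_py_spec : Claim_equal_squash_resolutions_py := by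
  intro resolved _
  unfold Spec_squash_resolutions_py
  rw [A_eq_squashC, alt_eq_squashC]
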